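-- pv_equiv track=rewrite | github.com/sekigaharaEI/nero-cc-marketplace | plugins/zxw-zentao-bug-fix/scripts/setup_zentao.py | replace_or_append_block
-- ===== SOURCE A (Python) =====
-- def replace_or_append_block(text: str, block: str) -> str:
--     lines = text.splitlines()
--     start: int | None = None
--     end: int | None = None
--     for idx, line in enumerate(lines):
--         if line.strip() == "[mcp_servers.zentao]":
--             start = idx
--             break
--     if start is None:
--         if lines and lines[-1].strip():
--             lines.append("")
--         lines.extend(block.rstrip("\n").splitlines())
--         return "\n".join(lines).rstrip("\n") + "\n"
--
--     end = start + 1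
--     while end < len(lines):
--         stripped = lines[end].strip()
--         if stripped.startswith("[") and not stripped.startswith("[mcp_servers.zentao"):
--             break
--         end += 1
--
--     new_lines = lines[:start] + block.rstrip("\n").splitlines() + lines[end:]
--     return "\n".join(new_lines).rstrip("\n") + "\n"
-- ===== SOURCE B (Python) =====
-- HEADER = "[mcp_servers.zentao]"
--
-- def replace_or_append_block(text: str, block: str) -> str:
--     # single state-machine pass: collect `before` until the header line,
--     # skip the old section, collect `after` from its boundary on
--     before: list[str] = []
--     after: list[str] = []
--     found = False
--     phase = 0  # 0 = before header, 1 = skipping old section, 2 = after section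
--     for line in text.splitlines():
--         if phase == 0:
--             if line.strip() == HEADER:
--                 found = True
--                 phase = 1
--             else:
--                 before.append(line)
--         elif phase == 1:
--             s = line.strip()
--             if s.startswith("[") and not s.startswith("[mcp_servers.zentao"):
--                 after.append(line)
--                 phase = 2
--         else:
--             after.append(line)
--     blk = block.rstrip("\n").splitlines()
--     if found:
--         result = before + blk + after
--     else:
--         if before and before[-1].strip():
--             before.append("")
--         result = before + blk
--     return "\n".join(result).rstrip("\n") + "\n"
-- ===== Notes on version B (the rewrite author's own statement) =====
-- stated objective: alternative
-- what changed: Replaces A's index-based two-scan (enumerate to find the header index, then a while loop advancing an end index, then list slicing) with a single state-machine pass over the lines that accumulates the before/after parts directly, no indices or slices.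
import Mathlib
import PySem

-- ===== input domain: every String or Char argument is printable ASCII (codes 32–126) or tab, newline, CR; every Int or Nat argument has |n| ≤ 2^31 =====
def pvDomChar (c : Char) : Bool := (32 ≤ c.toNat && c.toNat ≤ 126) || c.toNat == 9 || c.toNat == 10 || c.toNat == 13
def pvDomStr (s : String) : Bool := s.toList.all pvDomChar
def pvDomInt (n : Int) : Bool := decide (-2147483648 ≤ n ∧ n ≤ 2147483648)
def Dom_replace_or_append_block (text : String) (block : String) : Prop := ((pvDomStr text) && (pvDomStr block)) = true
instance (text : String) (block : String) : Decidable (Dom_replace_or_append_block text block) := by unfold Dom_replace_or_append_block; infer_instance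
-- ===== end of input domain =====

-- B differs from A by decomposition only (one state-machine pass instead of
-- index search + while scan + slicing); same return value, no side effects.

-- shared literal constants of the Python source
def roabHeader : List Char := "[mcp_servers.zentao]".toList
def roabPrefix : List Char := "[mcp_servers.zentao".toList

-- s.rstrip("\n") : strip only trailing '\n' characters (exact: str.rstrip with a
-- chars argument removes trailing characters from that set; here the set is {'\n'})
def pyRstripNl (cs : List Char) : List Char := (cs.reverse.dropWhile (· == '\n')).reverse

-- "\n".join(xs).rstrip("\n") + "\n" — the common final rendering of both versions
def roabRender (xs : List (List Char)) : String :=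
  String.ofList (pyRstripNl (PySem.Chars.join ['\n'] xs) ++ ['\n'])

-- ===== PORT A =====
-- the for/enumerate loop with break: first index whose stripped line equals the header
def roabFind : List (List Char) → Option Nat
  | [] => none
  | l :: rest =>
      if PySem.Chars.strip l = roabHeader then some 0
      else (roabFind rest).map (· + 1)

-- the while loop: advance e until a boundary line (starts with '[' but not the prefix)
def roabFindEnd (lines : List (List Char)) (e : Nat) : Nat :=
  if h : e < lines.length then
    let stripped := PySem.Chars.strip lines[e]
    if PySem.Chars.startswith stripped ['['] && !PySem.Chars.startswith stripped roabPrefix then e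
    else roabFindEnd lines (e + 1)
  else e
termination_by lines.length - e

def replace_or_append_block (text : String) (block : String) : String :=
  let lines := PySem.Chars.splitlines text.toList
  let blk := PySem.Chars.splitlines (pyRstripNl block.toList)
  match roabFind lines with
  | none =>
      -- `if lines and lines[-1].strip(): lines.append("")` (getLast? is none iff lines is empty)
      let lines2 :=
        match lines.getLast? with
        | none => lines
        | some l => if PySem.Chars.strip l = [] then lines else lines ++ [[]]
      roabRender (lines2 ++ blk)
  | some s =>
      let e := roabFindEnd lines (s + 1)
      roabRender (lines.take s ++ blk ++ lines.drop e)

-- ===== PORT B =====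
-- one step of the state machine: state = (before, after, found, phase)
def roabStep (st : List (List Char) × List (List Char) × Bool × Nat) (line : List Char) :
    List (List Char) × List (List Char) × Bool × Nat :=
  let (before, after, found, phase) := st
  if phase = 0 then
    if PySem.Chars.strip line = roabHeader then (before, after, true, 1)
    else (before ++ [line], after, found, phase)
  else if phase = 1 then
    let s := PySem.Chars.strip line
    if PySem.Chars.startswith s ['['] && !PySem.Chars.startswith s roabPrefix then
      (before, after ++ [line], found, 2)
    else st
  else (before, after ++ [line], found, phase)

def replace_or_append_block_alt (text : String) (block : String) : String :=
  let lines := PySem.Chars.splitlines text.toList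
  let st := lines.foldl roabStep ([], [], false, 0)
  let blk := PySem.Chars.splitlines (pyRstripNl block.toList)
  let result :=
    if st.2.2.1 then st.1 ++ blk ++ st.2.1
    else
      let before2 :=
        match st.1.getLast? with
        | none => st.1
        | some l => if PySem.Chars.strip l = [] then st.1 else st.1 ++ [[]]
      before2 ++ blk
  roabRender result

-- ===== PRECONDITION & SPEC =====
def Spec_replace_or_append_block (text : String) (block : String) (out : String) : Prop := out = replace_or_append_block_alt text block
instance (text : String) (block : String) (out : String) : Decidable (Spec_replace_or_append_block text block out) := by unfold Spec_replace_or_append_block; infer_instance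

-- ===== CLAIM (what is proved, stated in full; the proofs are below) =====
def Claim_equal_replace_or_append_block : Prop := ∀ (text : String) (block : String), Dom_replace_or_append_block text block → Spec_replace_or_append_block text block (replace_or_append_block text block)

-- ===== LEMMAS AND PROOFS =====

-- boundary test of the while loop / of phase 1
def roabBound (l : List Char) : Bool :=
  PySem.Chars.startswith (PySem.Chars.strip l) ['['] &&
    !PySem.Chars.startswith (PySem.Chars.strip l) roabPrefix

-- the suffix of ls from its first boundary line on (empty if none)
def roabSkip : List (List Char) → List (List Char)
  | [] => []
  | l :: rest => if roabBound l then l :: rest else roabSkip rest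

theorem roabStep_phase2 (ls : List (List Char)) (b a : List (List Char)) (f : Bool) :
    ls.foldl roabStep (b, a, f, 2) = (b, a ++ ls, f, 2) := by
  induction ls generalizing a with
  | nil => simp
  | cons l rest ih => simp [roabStep, ih]

theorem roabStep_phase1 (ls : List (List Char)) (b a : List (List Char)) (f : Bool) :
    ls.foldl roabStep (b, a, f, 1) =
      (b, a ++ roabSkip ls, f, if roabSkip ls = [] then 1 else 2) := by
  induction ls generalizing a with
  | nil => simp [roabSkip]
  | cons l rest ih =>
    by_cases h : roabBound l = true
    · have hb := h
      simp [roabBound] at hb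
      simp [roabSkip, h, List.foldl_cons, roabStep, hb, roabStep_phase2]
    · have hb : (PySem.Chars.startswith (PySem.Chars.strip l) ['['] &&
          !PySem.Chars.startswith (PySem.Chars.strip l) roabPrefix) = false := by
        simpa [roabBound] using h
      simp [roabSkip, h, List.foldl_cons, roabStep, hb, ih]

theorem roabStep_main (ls : List (List Char)) (b : List (List Char)) :
    ls.foldl roabStep (b, [], false, 0) =
      match roabFind ls with
      | none => (b ++ ls, [], false, 0)
      | some s => (b ++ ls.take s, roabSkip (ls.drop (s + 1)), true,
          if roabSkip (ls.drop (s + 1)) = [] then 1 else 2) := by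
  induction ls generalizing b with
  | nil => simp [roabFind]
  | cons l rest ih =>
    by_cases h : PySem.Chars.strip l = roabHeader
    · simp [roabFind, h, List.foldl_cons, roabStep, roabStep_phase1]
    · rw [List.foldl_cons]
      have hs : roabStep (b, [], false, 0) l = (b ++ [l], [], false, 0) := by
        simp [roabStep, h]
      rw [hs, ih]
      cases hf : roabFind rest with
      | none => simp [roabFind, h, hf]
      | some s => simp [roabFind, h, hf, List.take_succ_cons, List.append_assoc]

theorem roabFindEnd_drop (ls : List (List Char)) (e : Nat) :
    ls.drop (roabFindEnd ls e) = roabSkip (ls.drop e) := by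
  by_cases h : e < ls.length
  · rw [roabFindEnd]
    have hd : ls.drop e = ls[e] :: ls.drop (e + 1) := List.drop_eq_getElem_cons h
    by_cases hb : roabBound ls[e] = true
    · have hb' := hb
      simp [roabBound] at hb'
      simp only [h, dif_pos, hb']
      rw [hd, roabSkip, if_pos hb]
      · simp [hb']
    · have hb' : (PySem.Chars.startswith (PySem.Chars.strip ls[e]) ['['] &&
          !PySem.Chars.startswith (PySem.Chars.strip ls[e]) roabPrefix) = false := by
        simpa [roabBound] using hb
      simp only [h, dif_pos]
      rw [if_neg (by simp [hb'])]
      rw [roabFindEnd_drop ls (e + 1), hd, roabSkip, if_neg (by simp [hb])]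
  · rw [roabFindEnd, dif_neg h]
    have : ls.drop e = [] := List.drop_eq_nil_of_le (Nat.le_of_not_lt h)
    simp [this, roabSkip]
termination_by ls.length - e
decreasing_by omega

-- ===== VERDICT (by name: the statement is the Claim_ definition above) =====
theorem replace_or_append_block_spec : Claim_equal_replace_or_append_block := by
  intro text block _
  unfold Spec_replace_or_append_block replace_or_append_block replace_or_append_block_alt
  simp only [roabStep_main]
  cases hf : roabFind (PySem.Chars.splitlines text.toList) with
  | none => simp
  | some s => simp [roabFindEnd_drop]
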